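-- pv_equiv track=rewrite | github.com/unjambonakap/chdrft | emu/binary.py | norm_ins
-- ===== SOURCE A (Python) =====
-- def norm_ins(code):
--   if isinstance(code, str):
--     code = [code]
--
--   tsf = []
--   for i in code:
--     tsf.extend(i.split(';'))
--
--   x = '\n'.join(map(str.strip, tsf))
--   x += '\n'
--   return x
-- ===== SOURCE B (Python) =====
-- def norm_ins(code):
--   if isinstance(code, str):
--     code = [code]
--   pieces = []
--   for s in code:
--     cur = []
--     for ch in s:
--       if ch == ';':
--         pieces.append(''.join(cur).strip())
--         cur = []
--       else:
--         cur.append(ch)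
--     pieces.append(''.join(cur).strip())
--   return '\n'.join(pieces) + '\n'
-- ===== Notes on version B (the rewrite author's own statement) =====
-- stated objective: alternative
-- what changed: Replaces the split-based flatten (extend with i.split(';') then map strip) by a single character-level scan with a (pieces, current-piece) accumulator that emits a stripped piece at each ';' and at each element boundary.
import Mathlib
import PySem

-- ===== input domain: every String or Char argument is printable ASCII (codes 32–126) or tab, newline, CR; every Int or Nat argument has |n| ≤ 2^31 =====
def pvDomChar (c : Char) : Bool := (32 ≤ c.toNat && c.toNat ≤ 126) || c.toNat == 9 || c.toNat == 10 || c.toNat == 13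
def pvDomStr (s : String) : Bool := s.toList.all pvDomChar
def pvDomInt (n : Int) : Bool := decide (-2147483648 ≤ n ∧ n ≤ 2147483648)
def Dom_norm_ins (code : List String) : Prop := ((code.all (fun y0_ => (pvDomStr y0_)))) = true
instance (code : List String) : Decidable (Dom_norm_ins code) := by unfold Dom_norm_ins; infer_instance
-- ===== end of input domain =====

-- B replaces A's split/strip pipeline by a single character-level scan emitting stripped pieces at ';'/element boundaries (alternative decomposition, same cost).


-- ===== PORT A =====
-- strings are handled as their char lists (PySem.Chars is exact on the ASCII domain)
def norm_ins (code : List String) : String :=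
  -- tsf = []; for i in code: tsf.extend(i.split(';'))
  let tsf : List (List Char) :=
    code.foldl (fun tsf i => tsf ++ PySem.Chars.splitOn i.toList [';']) []
  -- x = '\n'.join(map(str.strip, tsf)); x += '\n'
  let x := PySem.Chars.join ['\n'] (tsf.map PySem.Chars.strip)
  String.ofList (x ++ ['\n'])

-- ===== PORT B =====
-- single scan: state = (pieces so far, current piece); emit stripped piece on ';' and at element end
def norm_ins_alt (code : List String) : String :=
  let pieces : List (List Char) :=
    code.foldl (fun pieces s =>
      let st := s.toList.foldl
        (fun (st : List (List Char) × List Char) ch =>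
          if ch = ';' then (st.1 ++ [PySem.Chars.strip st.2], [])
          else (st.1, st.2 ++ [ch]))
        (pieces, [])
      st.1 ++ [PySem.Chars.strip st.2]) []
  String.ofList (PySem.Chars.join ['\n'] pieces ++ ['\n'])

-- ===== PRECONDITION & SPEC =====
def Spec_norm_ins (code : List String) (out : String) : Prop := out = norm_ins_alt code
instance (code : List String) (out : String) : Decidable (Spec_norm_ins code out) := by unfold Spec_norm_ins; infer_instance

-- ===== CLAIM (what is proved, stated in full; the proofs are below) =====
def Claim_equal_norm_ins : Prop := ∀ (code : List String), Dom_norm_ins code → Spec_norm_ins code (norm_ins code)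

-- ===== LEMMAS AND PROOFS =====

/-- A simple structural splitter on ';', used to characterise `PySem.Chars.splitOn · [';']`. -/
def spSemi : List Char → List (List Char)
  | [] => [[]]
  | c :: rest => if c = ';' then [] :: spSemi rest else (spSemi rest).modifyHead (c :: ·)

theorem spSemi_ne_nil (l : List Char) : spSemi l ≠ [] := by
  cases l with
  | nil => simp [spSemi]
  | cons c rest =>
    simp only [spSemi]
    split_ifs
    · simp
    · cases h : spSemi rest with
      | nil => exact absurd h (spSemi_ne_nil rest)
      | cons a t => simp [List.modifyHead]

theorem splitOn_go_eq (fuel : Nat) (l cur : List Char) (acc : List (List Char))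
    (h : l.length ≤ fuel) :
    PySem.Chars.splitOn.go [';'] fuel l cur acc
      = acc.reverse ++ (spSemi l).modifyHead (cur.reverse ++ ·) := by
  induction fuel generalizing l cur acc with
  | zero =>
    have : l = [] := by cases l <;> simp_all
    subst this
    rw [PySem.Chars.splitOn.go.eq_def]
    simp [spSemi]
  | succ f ih =>
    cases l with
    | nil =>
      rw [PySem.Chars.splitOn.go.eq_def]
      simp [spSemi]
    | cons c rest =>
      rw [PySem.Chars.splitOn.go.eq_def]
      simp only [List.isPrefixOf, Bool.and_true]
      by_cases hc : c = ';'
      · subst hc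
        simp only [beq_self_eq_true, if_pos]
        simp only [List.length_nil, List.length_cons, List.drop_succ_cons, List.drop_zero]
        rw [ih rest [] (List.reverse cur :: acc) (by simpa using Nat.le_of_succ_le_succ h)]
        have hid : (spSemi rest).modifyHead (List.reverse [] ++ ·) = spSemi rest := by
          cases spSemi rest <;> simp [List.modifyHead]
        rw [hid]
        simp [spSemi]
      · have hbe : ((';' : Char) == c) = false := by
          simp; exact fun hh => hc hh.symm
        simp only [hbe, Bool.false_eq_true]
        rw [ih rest (c :: cur) acc (by simpa using Nat.le_of_succ_le_succ h)]
        have hne := spSemi_ne_nil rest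
        cases hsp : spSemi rest with
        | nil => exact absurd hsp hne
        | cons a t =>
          simp [spSemi, hc, hsp, List.modifyHead]

theorem splitOn_eq_spSemi (s : List Char) :
    PySem.Chars.splitOn s [';'] = spSemi s := by
  unfold PySem.Chars.splitOn
  rw [splitOn_go_eq (s.length + 1) s [] [] (by omega)]
  cases h : spSemi s with
  | nil => exact absurd h (spSemi_ne_nil s)
  | cons a t => simp [List.modifyHead]

/-- B's inner character step. -/
def stepB (st : List (List Char) × List Char) (ch : Char) : List (List Char) × List Char :=
  if ch = ';' then (st.1 ++ [PySem.Chars.strip st.2], []) else (st.1, st.2 ++ [ch])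

/-- After scanning a string and emitting the final piece, the scan produces exactly the
stripped `spSemi` pieces (the pending `cur` is glued onto the first piece). -/
theorem inner_emit (s : List Char) (out : List (List Char)) (cur : List Char) :
    (s.foldl stepB (out, cur)).1 ++ [PySem.Chars.strip (s.foldl stepB (out, cur)).2]
      = out ++ ((spSemi s).modifyHead (cur ++ ·)).map PySem.Chars.strip := by
  induction s generalizing out cur with
  | nil => simp [spSemi, List.modifyHead]
  | cons c rest ih =>
    by_cases hc : c = ';'
    · subst hc
      simp only [List.foldl_cons, stepB, if_pos rfl]
      rw [ih]
      simp [spSemi, List.modifyHead]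
      cases spSemi rest <;> rfl
    · simp only [List.foldl_cons, stepB, if_neg hc]
      rw [ih]
      cases h : spSemi rest with
      | nil => exact absurd h (spSemi_ne_nil rest)
      | cons a t => simp [spSemi, hc, h, List.modifyHead]

/-- The outer fold accumulates the stripped pieces of every element. -/
theorem outer_fold (code : List String) (acc : List (List Char)) :
    code.foldl (fun pieces s =>
      let st := s.toList.foldl stepB (pieces, ([] : List Char))
      st.1 ++ [PySem.Chars.strip st.2]) acc
      = acc ++ code.flatMap (fun s => (spSemi s.toList).map PySem.Chars.strip) := by
  induction code generalizing acc with
  | nil => simp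
  | cons s rest ih =>
    simp only [List.foldl_cons, List.flatMap_cons]
    rw [ih]
    have h := inner_emit s.toList acc []
    have hid : (spSemi s.toList).modifyHead (([] : List Char) ++ ·) = spSemi s.toList := by
      cases spSemi s.toList <;> simp [List.modifyHead]
    rw [hid] at h
    simp only [h, List.append_assoc]

-- ===== VERDICT (by name: the statement is the Claim_ definition above) =====
theorem norm_ins_spec : Claim_equal_norm_ins := by
  intro code _
  show norm_ins code = norm_ins_alt code
  unfold norm_ins norm_ins_alt
  rw [PySem.List.foldl_append_eq_flatMap (fun i => PySem.Chars.splitOn i.toList [';']) code []]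
  have : (code.foldl (fun pieces s =>
      let st := s.toList.foldl
        (fun (st : List (List Char) × List Char) ch =>
          if ch = ';' then (st.1 ++ [PySem.Chars.strip st.2], [])
          else (st.1, st.2 ++ [ch]))
        (pieces, [])
      st.1 ++ [PySem.Chars.strip st.2]) [])
      = code.flatMap (fun s => (spSemi s.toList).map PySem.Chars.strip) := by
    have := outer_fold code []
    simpa [stepB] using this
  rw [this]
  have hA : (code.flatMap (fun i => PySem.Chars.splitOn i.toList [';'])).map PySem.Chars.strip
      = code.flatMap (fun s => (spSemi s.toList).map PySem.Chars.strip) := by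
    rw [List.map_flatMap]
    simp [splitOn_eq_spSemi]
  dsimp only
  rw [List.nil_append, hA]
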